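-- pv_equiv track=rewrite | github.com/saleprobe/Algorithm | Programmers/ctrl_z.py | solution
-- ===== SOURCE A (Python) =====
-- def solution(s):
--     answer = 0
--     s = s.split()
--     before_word = 0
--     for word in s:
--         if word == 'Z':
--             answer -= int(before_word)
--             before_word = 0
--         elif word != 'Z':
--             answer += int(word)
--             before_word = int(word)
--
--     return answer
-- ===== SOURCE B (Python) =====
-- def solution(s):
--     words = s.split()
--     vals = [None if w == 'Z' else int(w) for w in words]
--     return sum(v for v, nxt in zip(vals, words[1:] + ['']) if v is not None and nxt != 'Z')
-- ===== Notes on version B (the rewrite author's own statement) =====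
-- stated objective: alternative
-- what changed: Replaces the running answer/before_word state machine with a stateless look-ahead: every non-'Z' token is int()-converted up front, then the result is the sum of the numeric tokens whose successor is not 'Z' (zip with the shifted token list).
import Mathlib
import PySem

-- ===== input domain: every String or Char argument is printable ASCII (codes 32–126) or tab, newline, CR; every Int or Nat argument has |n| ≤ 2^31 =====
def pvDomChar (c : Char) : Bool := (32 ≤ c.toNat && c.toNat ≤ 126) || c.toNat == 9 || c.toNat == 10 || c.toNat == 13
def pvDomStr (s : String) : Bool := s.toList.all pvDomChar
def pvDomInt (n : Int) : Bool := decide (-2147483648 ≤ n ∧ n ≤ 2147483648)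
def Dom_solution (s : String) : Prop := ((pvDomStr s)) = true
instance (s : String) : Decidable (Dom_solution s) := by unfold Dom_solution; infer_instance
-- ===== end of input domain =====

-- B replaces A's running answer/before_word state machine by a stateless look-ahead:
-- all non-'Z' tokens are int()-converted up front, and the answer is the sum of the
-- numeric tokens whose successor token is not 'Z'. Same cost; alternative decomposition.

-- int(w), total under Pre_ (Python raises ValueError exactly where ofStr? is none)
def pvVal (w : String) : Int := (PySem.Int.ofStr? w).getD 0

-- ===== PORT A =====
def solution (s : String) : Int :=
  (List.foldl
    (fun (st : Int × Int) word =>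
      if word = "Z" then (st.1 - st.2, 0)
      else if word ≠ "Z" then (st.1 + pvVal word, pvVal word)
      else st)
    (0, 0) (PySem.Str.split₀ s)).1

-- ===== PORT B =====
def solution_alt (s : String) : Int :=
  let words := PySem.Str.split₀ s
  let vals := words.map (fun w => if w = "Z" then none else some (pvVal w))
  List.foldl
    (fun (acc : Int) (p : Option Int × String) =>
      match p.1 with
      | some v => if p.2 ≠ "Z" then acc + v else acc
      | none => acc)
    0 (List.zip vals (words.drop 1 ++ [""]))

-- ===== PRECONDITION & SPEC =====
-- Pre_ excludes exactly the inputs on which Python A raises ValueError: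
-- some whitespace-separated token other than 'Z' is not a valid int() literal.
def Pre_solution (s : String) : Prop :=
  ∀ w ∈ PySem.Str.split₀ s, w = "Z" ∨ (PySem.Int.ofStr? w).isSome
instance (s : String) : Decidable (Pre_solution s) := by unfold Pre_solution; infer_instance
def pvWitness_solution : String := "1 2 Z 3"

def Spec_solution (s : String) (out : Int) : Prop := out = solution_alt s
instance (s : String) (out : Int) : Decidable (Spec_solution s out) := by unfold Spec_solution; infer_instance

-- ===== CLAIM (what is proved, stated in full; the proofs are below) =====
def Claim_equal_solution : Prop := ∀ (s : String), Dom_solution s → Pre_solution s → Spec_solution s (solution s)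

-- ===== LEMMAS AND PROOFS =====

-- A's loop, as a function of the word list and the before_word state
def pvS : List String → Int → Int
  | [], _ => 0
  | w :: ws, b => if w = "Z" then -b + pvS ws 0 else pvVal w + pvS ws (pvVal w)

-- B's sum, as a function of the word list
def pvT : List String → Int
  | [] => 0
  | w :: ws => (if w = "Z" then 0 else if ws.headD "" = "Z" then 0 else pvVal w) + pvT ws

lemma pvA_fold (ws : List String) (a b : Int) :
    (List.foldl
      (fun (st : Int × Int) word =>
        if word = "Z" then (st.1 - st.2, 0)
        else if word ≠ "Z" then (st.1 + pvVal word, pvVal word)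
        else st)
      (a, b) ws).1 = a + pvS ws b := by
  induction ws generalizing a b with
  | nil => simp [pvS]
  | cons w ws ih =>
    rw [List.foldl_cons]
    by_cases h : w = "Z"
    · rw [if_pos h, ih]; simp [pvS, h]; ring
    · rw [if_neg h, if_pos h, ih]; simp [pvS, h]; ring

lemma pvB_fold (ws : List String) (a : Int) :
    List.foldl
      (fun (acc : Int) (p : Option Int × String) =>
        match p.1 with
        | some v => if p.2 ≠ "Z" then acc + v else acc
        | none => acc)
      a (List.zip (ws.map (fun w => if w = "Z" then none else some (pvVal w))) (ws.drop 1 ++ [""])) = a + pvT ws := by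
  induction ws generalizing a with
  | nil => simp [pvT]
  | cons w tl ih =>
    cases tl with
    | nil =>
      by_cases h : w = "Z" <;> simp [pvT, h]
    | cons w' tl' =>
      have := ih (a := (if w = "Z" then a
        else if w' ≠ "Z" then a + pvVal w else a))
      by_cases h : w = "Z" <;> by_cases h' : w' = "Z" <;>
        simp [pvT, h, h', List.headD] at this ⊢ <;> omega

lemma pvS_eq_pvT (ws : List String) (b : Int) :
    pvS ws b = pvT ws - (if ws.headD "" = "Z" then b else 0) := by
  induction ws generalizing b with
  | nil => simp [pvS, pvT, List.headD]
  | cons w tl ih =>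
    by_cases h : w = "Z" <;>
      by_cases h' : tl.head?.getD "" = "Z" <;>
        simp [pvS, pvT, h, h', ih] <;> ring

-- ===== VERDICT (by name: the statement is the Claim_ definition above) =====
theorem solution_spec : Claim_equal_solution := by
  intro s _ _
  unfold Spec_solution solution solution_alt
  rw [pvA_fold, pvB_fold, pvS_eq_pvT]
  simp
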